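-- pv_equiv track=rewrite | github.com/auster80/Budgeting-App | src/budgeting_app/ai.py | _resolve_category_name
-- ===== SOURCE A (Python) =====
-- from typing import Callable, Iterable, List, Optional, Sequence, Tuple
--
-- def _resolve_category_name(
--     suggestion: str, existing_categories: Sequence[str]
-- ) -> str:
--     """Adjust a heuristic suggestion to match an existing category name."""
--
--     suggestion_lower = suggestion.lower()
--     for name in existing_categories:
--         if name.lower() == suggestion_lower:
--             return name
--     for name in existing_categories:
--         lowered = name.lower()
--         if suggestion_lower in lowered or lowered in suggestion_lower:
--             return name
--     return suggestion
-- ===== SOURCE B (Python) =====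
-- def _resolve_category_name(suggestion, existing_categories):
--     """Single pass: return the first exact (case-insensitive) match immediately;
--     remember the first substring match as a fallback."""
--     suggestion_lower = suggestion.lower()
--     saved = None
--     for name in existing_categories:
--         lowered = name.lower()
--         if lowered == suggestion_lower:
--             return name
--         if (suggestion_lower in lowered or lowered in suggestion_lower) and saved is None:
--             saved = name
--     return saved if saved is not None else suggestion
-- ===== Notes on version B (the rewrite author's own statement) =====
-- stated objective: alternative
-- what changed: Replaces A's two sequential scans with a single loop that returns on the first exact lowercase match and keeps the first substring match as a fallback accumulator (correctness hinges on exact matches implying substring matches, so an exact hit later still beats an earlier saved substring).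
import Mathlib
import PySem

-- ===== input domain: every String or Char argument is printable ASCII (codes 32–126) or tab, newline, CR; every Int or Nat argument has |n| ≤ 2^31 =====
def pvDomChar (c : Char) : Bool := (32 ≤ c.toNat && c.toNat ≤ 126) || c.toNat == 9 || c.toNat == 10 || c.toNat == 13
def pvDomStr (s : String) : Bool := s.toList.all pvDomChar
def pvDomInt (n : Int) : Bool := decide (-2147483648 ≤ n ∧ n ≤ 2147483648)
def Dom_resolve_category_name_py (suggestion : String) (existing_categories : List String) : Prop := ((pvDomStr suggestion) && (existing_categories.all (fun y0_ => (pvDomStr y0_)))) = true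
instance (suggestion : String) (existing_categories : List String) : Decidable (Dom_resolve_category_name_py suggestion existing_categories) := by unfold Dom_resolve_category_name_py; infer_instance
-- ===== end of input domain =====

-- B replaces A's two sequential scans with one loop carrying a fallback accumulator; objective: alternative (same cost).

-- ===== PORT A =====
-- first loop of A: first name whose lowercase equals suggestion_lower
def pvAExact (sl : String) : List String → Option String
  | [] => none
  | name :: rest =>
    if PySem.Str.lower name == sl then some name else pvAExact sl rest

-- second loop of A: first name related to suggestion_lower by substring containment
def pvASub (sl : String) : List String → Option String
  | [] => none
  | name :: rest =>
    let lowered := PySem.Str.lower name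
    if PySem.Str.isIn sl lowered || PySem.Str.isIn lowered sl then some name
    else pvASub sl rest

def resolve_category_name_py (suggestion : String) (existing_categories : List String) : String :=
  let suggestion_lower := PySem.Str.lower suggestion
  match pvAExact suggestion_lower existing_categories with
  | some name => name
  | none =>
    match pvASub suggestion_lower existing_categories with
    | some name => name
    | none => suggestion

-- ===== PORT B =====
-- B's single loop: return on exact match, save the first substring match in `saved`
def pvBLoop (sl suggestion : String) (saved : Option String) : List String → String
  | [] => match saved with | some name => name | none => suggestion
  | name :: rest =>
    let lowered := PySem.Str.lower name
    if lowered == sl then name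
    else if (PySem.Str.isIn sl lowered || PySem.Str.isIn lowered sl) && saved.isNone then
      pvBLoop sl suggestion (some name) rest
    else
      pvBLoop sl suggestion saved rest

def resolve_category_name_py_alt (suggestion : String) (existing_categories : List String) : String :=
  pvBLoop (PySem.Str.lower suggestion) suggestion none existing_categories

-- ===== PRECONDITION & SPEC =====
def Spec_resolve_category_name_py (suggestion : String) (existing_categories : List String) (out : String) : Prop := out = resolve_category_name_py_alt suggestion existing_categories
instance (suggestion : String) (existing_categories : List String) (out : String) : Decidable (Spec_resolve_category_name_py suggestion existing_categories out) := by unfold Spec_resolve_category_name_py; infer_instance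

-- ===== CLAIM (what is proved, stated in full; the proofs are below) =====
def Claim_equal_resolve_category_name_py : Prop := ∀ (suggestion : String) (existing_categories : List String), Dom_resolve_category_name_py suggestion existing_categories → Spec_resolve_category_name_py suggestion existing_categories (resolve_category_name_py suggestion existing_categories)

-- ===== LEMMAS AND PROOFS =====

-- characterisation of B's loop in terms of A's two scans
theorem pvBLoop_eq (sl suggestion : String) (saved : Option String) (l : List String) :
    pvBLoop sl suggestion saved l =
      match pvAExact sl l with
      | some name => name
      | none =>
        match saved with
        | some x => x
        | none => match pvASub sl l with | some name => name | none => suggestion := by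
  induction l generalizing saved with
  | nil => cases saved <;> simp [pvBLoop, pvAExact, pvASub]
  | cons name rest ih =>
    by_cases he : (PySem.Str.lower name == sl) = true
    · simp [pvBLoop, pvAExact, he]
    · by_cases hs : PySem.Chars.isIn sl.toList (PySem.Chars.lower name.toList) = true ∨ PySem.Chars.isIn (PySem.Chars.lower name.toList) sl.toList = true
      · cases saved with
        | none => simp [pvBLoop, pvAExact, pvASub, he, hs, ih]
        | some x => simp [pvBLoop, pvAExact, he, ih]
      · cases saved with
        | none => simp [pvBLoop, pvAExact, pvASub, he, hs, ih]
        | some x => simp [pvBLoop, pvAExact, he, ih]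

-- ===== VERDICT (by name: the statement is the Claim_ definition above) =====
theorem resolve_category_name_py_spec : Claim_equal_resolve_category_name_py := by
  intro suggestion l _
  unfold Spec_resolve_category_name_py resolve_category_name_py resolve_category_name_py_alt
  rw [pvBLoop_eq]
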